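-- pv_equiv track=rewrite | github.com/semeneleven/XTest | codes/others/bdc.py | bdc_decode
-- ===== SOURCE A (Python) =====
-- def bdc_decode(code, base):
--     result = 0
--     for i in range(len(code) // 4):
--         four = code[i * 4:i * 4 + 4]
--         num = 0
--         for j in range(len(four)):
--             num += int(four[j]) * base[j]
--         result = result * 10 + num
--     return result
-- ===== SOURCE B (Python) =====
-- def bdc_decode(code, base):
--     n = len(code) // 4
--     nums = [sum(int(code[4 * i + j]) * base[j] for j in range(4)) for i in range(n)]
--     return sum(nums[k] * 10 ** (n - 1 - k) for k in range(n))
-- ===== Notes on version B (the rewrite author's own statement) =====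
-- stated objective: alternative
-- what changed: Replaces A's incremental Horner fold (result = result*10 + num inside one loop over chunks) with a two-phase pass: first collect the per-chunk values into a list nums, then combine them by explicit positional weighting sum(nums[k] * 10**(n-1-k)).
import Mathlib
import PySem

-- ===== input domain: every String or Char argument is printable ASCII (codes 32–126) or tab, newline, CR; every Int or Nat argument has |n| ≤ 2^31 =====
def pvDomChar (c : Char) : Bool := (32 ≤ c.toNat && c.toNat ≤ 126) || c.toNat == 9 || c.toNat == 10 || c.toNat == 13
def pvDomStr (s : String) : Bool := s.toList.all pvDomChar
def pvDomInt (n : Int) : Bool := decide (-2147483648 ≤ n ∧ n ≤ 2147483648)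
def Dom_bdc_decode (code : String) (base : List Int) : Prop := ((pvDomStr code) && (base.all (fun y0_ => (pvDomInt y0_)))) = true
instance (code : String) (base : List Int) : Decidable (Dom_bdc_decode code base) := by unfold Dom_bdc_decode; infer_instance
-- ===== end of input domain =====

-- B replaces A's running Horner fold (result = result*10 + num) by a two-phase pass:
-- collect the per-chunk values into a list, then sum them with explicit positional
-- weights 10^(n-1-k) (objective: alternative decomposition, same cost).

-- ===== PORT A =====
-- int(four[j]): (PySem.Int.ofChars? [c]).getD 0 — the default 0 is unreachable under
-- Pre_ (all processed chars are digits); base[j]: pyGetD, in range under Pre_.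
def bdc_decode (code : String) (base : List Int) : Int :=
  let cs := code.toList
  (List.range (cs.length / 4)).foldl (fun result i =>
    let four := PySem.List.slice cs (some ((4 * i : Nat) : Int)) (some ((4 * i + 4 : Nat) : Int))
    let num := (List.range four.length).foldl (fun num j =>
      num + ((PySem.Int.ofChars? [PySem.List.pyGetD four ((j : Nat) : Int) ' ']).getD 0)
              * PySem.List.pyGetD base ((j : Nat) : Int) 0) 0
    result * 10 + num) 0

-- ===== PORT B =====
def bdc_decode_alt (code : String) (base : List Int) : Int :=
  let cs := code.toList
  let n := cs.length / 4
  let nums := (List.range n).map (fun i =>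
    ((List.range 4).map (fun j =>
      ((PySem.Int.ofChars? [PySem.List.pyGetD cs ((4 * i + j : Nat) : Int) ' ']).getD 0)
        * PySem.List.pyGetD base ((j : Nat) : Int) 0)).sum)
  ((List.range n).map (fun k => PySem.List.pyGetD nums ((k : Nat) : Int) 0 * 10 ^ (n - 1 - k))).sum

-- ===== PRECONDITION & SPEC =====
-- Pre_: exactly where Python A returns normally — every character of the processed
-- prefix (the first 4*(len//4) chars) is a decimal digit (else int() raises ValueError),
-- and if there is at least one chunk, base has at least 4 elements (else IndexError).
def Pre_bdc_decode (code : String) (base : List Int) : Prop :=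
  ((code.toList.take (4 * (code.toList.length / 4))).all Char.isDigit = true)
  ∧ (code.toList.length / 4 = 0 ∨ 4 ≤ base.length)
instance (code : String) (base : List Int) : Decidable (Pre_bdc_decode code base) := by
  unfold Pre_bdc_decode; infer_instance

def pvWitness_bdc_decode : String × List Int := ("12345678", [1000, 100, 10, 1])

def Spec_bdc_decode (code : String) (base : List Int) (out : Int) : Prop := out = bdc_decode_alt code base
instance (code : String) (base : List Int) (out : Int) : Decidable (Spec_bdc_decode code base out) := by unfold Spec_bdc_decode; infer_instance

-- ===== CLAIM (what is proved, stated in full; the proofs are below) =====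
def Claim_equal_bdc_decode : Prop := ∀ (code : String) (base : List Int), Dom_bdc_decode code base → Pre_bdc_decode code base → Spec_bdc_decode code base (bdc_decode code base)

-- ===== LEMMAS AND PROOFS =====

-- the value of chunk i, shared shape of both ports
def pvChunk (cs : List Char) (base : List Int) (i : Nat) : Int :=
  ((List.range 4).map (fun j =>
    ((PySem.Int.ofChars? [PySem.List.pyGetD cs ((4 * i + j : Nat) : Int) ' ']).getD 0)
      * PySem.List.pyGetD base ((j : Nat) : Int) 0)).sum

lemma pvChunk_slice (cs : List Char) (base : List Int) (i : Nat) (hi : i < cs.length / 4) :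
    (let four := PySem.List.slice cs (some ((4 * i : Nat) : Int)) (some ((4 * i + 4 : Nat) : Int))
     (List.range four.length).foldl (fun num j =>
       num + ((PySem.Int.ofChars? [PySem.List.pyGetD four ((j : Nat) : Int) ' ']).getD 0)
               * PySem.List.pyGetD base ((j : Nat) : Int) 0) 0)
    = pvChunk cs base i := by
  have hlen : 4 * i + 4 ≤ cs.length := by omega
  have hfour : PySem.List.slice cs (some ((4 * i : Nat) : Int)) (some ((4 * i + 4 : Nat) : Int))
      = (cs.drop (4 * i)).take 4 := by
    rw [PySem.List.slice_natCast]; congr 1; omega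
  simp only [hfour, PySem.List.foldl_add, zero_add, pvChunk]
  have hl : ((cs.drop (4 * i)).take 4).length = 4 := by
    simp [List.length_take, List.length_drop]; omega
  rw [hl]
  apply congrArg
  apply List.map_congr_left
  intro j hj
  have hj4 : j < 4 := List.mem_range.mp hj
  have : PySem.List.pyGetD ((cs.drop (4 * i)).take 4) ((j : Nat) : Int) ' '
      = PySem.List.pyGetD cs ((4 * i + j : Nat) : Int) ' ' := by
    rw [PySem.List.pyGetD_natCast, PySem.List.pyGetD_natCast]
    rw [List.getD_eq_getElem?_getD, List.getD_eq_getElem?_getD]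
    rw [List.getElem?_take, List.getElem?_drop]
    simp [hj4]
  rw [this]

-- Horner fold from r over f 0 .. f (n-1) = r*10^n + positional sum
lemma pvHorner (f : Nat → Int) (n : Nat) (r : Int) :
    (List.range n).foldl (fun result i => result * 10 + f i) r
    = r * 10 ^ n + ((List.range n).map (fun k => f k * 10 ^ (n - 1 - k))).sum := by
  induction n generalizing r with
  | zero => simp
  | succ n ih =>
    rw [List.range_succ, List.foldl_append]
    simp only [List.foldl_cons, List.foldl_nil]
    rw [ih]
    rw [List.map_append, List.sum_append]
    have h1 : ((List.range n).map (fun k => f k * 10 ^ (n + 1 - 1 - k))).sum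
        = ((List.range n).map (fun k => f k * 10 ^ (n - 1 - k))).sum * 10 := by
      rw [← List.sum_map_mul_right]
      apply congrArg
      apply List.map_congr_left
      intro k hk
      have : k < n := List.mem_range.mp hk
      have he : n + 1 - 1 - k = (n - 1 - k) + 1 := by omega
      rw [he, pow_succ]; ring
    rw [h1]
    have h2 : n + 1 - 1 - n = 0 := by omega
    simp only [List.map_cons, List.map_nil, List.sum_cons, List.sum_nil, h2, pow_zero,
      mul_one, add_zero, pow_succ]
    ring

-- ===== VERDICT (by name: the statement is the Claim_ definition above) =====
theorem bdc_decode_spec : Claim_equal_bdc_decode := by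
  intro code base _ _
  show bdc_decode code base = bdc_decode_alt code base
  have hA : bdc_decode code base
      = (List.range (code.toList.length / 4)).foldl
          (fun result i => result * 10 + pvChunk code.toList base i) 0 := by
    unfold bdc_decode
    exact PySem.List.foldl_congr_mem _ _ _ _ (fun acc i hi =>
      congrArg (acc * 10 + ·) (pvChunk_slice code.toList base i (List.mem_range.mp hi)))
  have hB : bdc_decode_alt code base
      = ((List.range (code.toList.length / 4)).map
          (fun k => pvChunk code.toList base k * 10 ^ (code.toList.length / 4 - 1 - k))).sum := by
    show ((List.range (code.toList.length / 4)).map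
        (fun k => PySem.List.pyGetD
            ((List.range (code.toList.length / 4)).map (fun i => pvChunk code.toList base i))
            ((k : Nat) : Int) 0
          * 10 ^ (code.toList.length / 4 - 1 - k))).sum = _
    apply congrArg
    apply List.map_congr_left
    intro k hk
    have hkn : k < code.toList.length / 4 := List.mem_range.mp hk
    rw [PySem.List.pyGetD_natCast, List.getD_eq_getElem?_getD, List.getElem?_map,
      List.getElem?_range hkn]
    rfl
  rw [hA, hB, pvHorner]
  simp
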